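-- pv_equiv track=rewrite | github.com/RobertPennefather/CITS5502 | defect.py | easy_first
-- ===== SOURCE A (Python) =====
-- def easy_first(hours_remaining, defects):
--
--     while hours_remaining > 0:
--
--         if defects[2] > 0 and hours_remaining >= 2: # Easy, Major
--             hours_remaining -= 2
--             defects[2] -= 1
--
--         elif defects[3] > 0 and hours_remaining >= 2: # Easy, Minor
--             hours_remaining -= 2
--             defects[3] -= 1
--
--         elif defects[0] > 0 and hours_remaining >= 5: # Hard, Major
--             hours_remaining -= 5
--             defects[0] -= 1
--
--         elif defects[1] > 0 and hours_remaining >= 5: # Hard, Minor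
--             hours_remaining -= 5
--             defects[1] -= 1
--
--         else: # No defects left
--             break
--
--     return defects
-- ===== SOURCE B (Python) =====
-- def easy_first(hours_remaining, defects):
--     # Alternative to A: instead of fixing one defect per loop iteration, in priority
--     # order (easy-major, easy-minor, hard-major, hard-minor) compute how many
--     # defects fit in the remaining hours with floor division. Mutates `defects`
--     # in place, like A.
--     if hours_remaining <= 0:
--         return defects
--     h = hours_remaining
--     for i, cost in ((2, 2), (3, 2), (0, 5), (1, 5)):
--         n = max(0, min(defects[i], h // cost))
--         defects[i] -= n
--         h -= n * cost
--     return defects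
-- ===== Notes on version B (the rewrite author's own statement) =====
-- stated objective: alternative
-- what changed: Replaced A's one-fix-per-iteration while loop by direct arithmetic: for each category in priority order, the number of fixable defects is max(0, min(count, hours // cost)), applied once.
-- outside the precondition, e.g. on easy_first(4, [0, 0, 2]): A returns [0, 0, 0], B raises IndexError
import Mathlib
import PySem

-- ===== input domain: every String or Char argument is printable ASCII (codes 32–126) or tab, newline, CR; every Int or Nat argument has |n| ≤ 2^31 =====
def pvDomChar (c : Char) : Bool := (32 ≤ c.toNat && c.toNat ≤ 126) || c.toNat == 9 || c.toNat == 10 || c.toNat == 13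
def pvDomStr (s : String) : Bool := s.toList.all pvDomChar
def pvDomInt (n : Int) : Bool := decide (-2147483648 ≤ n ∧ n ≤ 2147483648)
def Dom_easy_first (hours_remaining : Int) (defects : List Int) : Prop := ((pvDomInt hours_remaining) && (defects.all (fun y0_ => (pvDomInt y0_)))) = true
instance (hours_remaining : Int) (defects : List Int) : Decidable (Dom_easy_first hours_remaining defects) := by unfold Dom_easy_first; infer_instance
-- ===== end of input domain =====

-- B replaces A's one-fix-per-iteration loop by one floor-division step per category;
-- equivalence is about the RETURN value (both Pythons also mutate `defects` in place identically).

-- ===== PORT A =====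
-- defects[i] reads/writes use the total forms pyGetD/pySetD (default 0); under
-- Pre_easy_first every index A reaches is in range, so they are exact there.
def easy_first (hours_remaining : Int) (defects : List Int) : List Int :=
  if _hpos : hours_remaining > 0 then
    if PySem.List.pyGetD defects 2 0 > 0 ∧ hours_remaining ≥ 2 then
      easy_first (hours_remaining - 2) (PySem.List.pySetD defects 2 (PySem.List.pyGetD defects 2 0 - 1))
    else if PySem.List.pyGetD defects 3 0 > 0 ∧ hours_remaining ≥ 2 then
      easy_first (hours_remaining - 2) (PySem.List.pySetD defects 3 (PySem.List.pyGetD defects 3 0 - 1))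
    else if PySem.List.pyGetD defects 0 0 > 0 ∧ hours_remaining ≥ 5 then
      easy_first (hours_remaining - 5) (PySem.List.pySetD defects 0 (PySem.List.pyGetD defects 0 0 - 1))
    else if PySem.List.pyGetD defects 1 0 > 0 ∧ hours_remaining ≥ 5 then
      easy_first (hours_remaining - 5) (PySem.List.pySetD defects 1 (PySem.List.pyGetD defects 1 0 - 1))
    else defects
  else defects
termination_by hours_remaining.toNat
decreasing_by all_goals omega

-- ===== PORT B =====
-- one loop body of Source B: n = max(0, min(defects[i], h // cost)); defects[i] -= n; h -= n*cost
def efPhase (s : Int × List Int) (p : Int × Int) : Int × List Int :=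
  let n := max 0 (min (PySem.List.pyGetD s.2 p.1 0) (PySem.Int.floordiv s.1 p.2))
  (s.1 - n * p.2, PySem.List.pySetD s.2 p.1 (PySem.List.pyGetD s.2 p.1 0 - n))

def easy_first_alt (hours_remaining : Int) (defects : List Int) : List Int :=
  if hours_remaining ≤ 0 then defects
  else (([(2, 2), (3, 2), (0, 5), (1, 5)] : List (Int × Int)).foldl efPhase (hours_remaining, defects)).2

-- ===== PRECONDITION & SPEC =====
-- Pre_ excludes inputs with positive hours but fewer than 4 defect categories: there A
-- usually raises IndexError, but can return when all hours go to index 2 (e.g. (4,[0,0,2]));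
-- B always indexes all four categories and itself raises IndexError on such lists.
def Pre_easy_first (hours_remaining : Int) (defects : List Int) : Prop :=
  hours_remaining ≤ 0 ∨ 4 ≤ defects.length
instance (hours_remaining : Int) (defects : List Int) : Decidable (Pre_easy_first hours_remaining defects) := by unfold Pre_easy_first; infer_instance
def pvWitness_easy_first : Int × List Int := (9, [1, 1, 2, 1])

def Spec_easy_first (hours_remaining : Int) (defects : List Int) (out : List Int) : Prop := out = easy_first_alt hours_remaining defects
instance (hours_remaining : Int) (defects : List Int) (out : List Int) : Decidable (Spec_easy_first hours_remaining defects out) := by unfold Spec_easy_first; infer_instance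

-- ===== CLAIM (what is proved, stated in full; the proofs are below) =====
def Claim_equal_easy_first : Prop := ∀ (hours_remaining : Int) (defects : List Int), Dom_easy_first hours_remaining defects → Pre_easy_first hours_remaining defects → Spec_easy_first hours_remaining defects (easy_first hours_remaining defects)

-- ===== LEMMAS AND PROOFS =====

lemma pySetD0 (d : List Int) (v : Int) : PySem.List.pySetD d 0 v = d.set 0 v := by
  rw [PySem.List.pySetD_of_nonneg d v (by norm_num)]; rfl
lemma pySetD1 (d : List Int) (v : Int) : PySem.List.pySetD d 1 v = d.set 1 v := by
  rw [PySem.List.pySetD_of_nonneg d v (by norm_num)]; rfl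
lemma pySetD2 (d : List Int) (v : Int) : PySem.List.pySetD d 2 v = d.set 2 v := by
  rw [PySem.List.pySetD_of_nonneg d v (by norm_num)]; rfl
lemma pySetD3 (d : List Int) (v : Int) : PySem.List.pySetD d 3 v = d.set 3 v := by
  rw [PySem.List.pySetD_of_nonneg d v (by norm_num)]; rfl

lemma getD_set_self (d : List Int) (i : Nat) (v : Int) (hi : i < d.length) :
    (d.set i v).getD i 0 = v := by
  simp [List.getD_eq_getElem?_getD, hi]

lemma getD_set_ne (d : List Int) (i j : Nat) (v : Int) (hij : i ≠ j) :
    (d.set j v).getD i 0 = d.getD i 0 := by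
  simp [List.getD_eq_getElem?_getD, List.getElem?_set_ne (by omega : j ≠ i)]

lemma set_getD_self (d : List Int) (i : Nat) (hi : i < d.length) :
    d.set i (d.getD i 0) = d := by
  rw [List.getD_eq_getElem _ _ hi]
  exact List.set_getElem_self ..

lemma floordiv_nonpos (h c : Int) (hc : 0 < c) (hlt : h < c) : PySem.Int.floordiv h c ≤ 0 := by
  have := (PySem.Int.floordiv_lt_iff_lt_mul (a := h) (b := c) (q := 1) hc).2 (by omega)
  omega

lemma floordiv_sub_self (h c : Int) (hc : 0 < c) :
    PySem.Int.floordiv (h - c) c = PySem.Int.floordiv h c - 1 := by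
  rw [PySem.Int.floordiv_eq_ediv_of_pos hc, PySem.Int.floordiv_eq_ediv_of_pos hc]
  have h1 := Int.add_mul_ediv_right h (-1) (show c ≠ 0 by omega)
  have h2 : h + -1 * c = h - c := by ring
  rw [h2] at h1
  omega

-- a phase whose category is empty or unaffordable leaves the state unchanged
lemma efPhase_noop (h c : Int) (d : List Int) (i : Nat) (hi : i < d.length) (hc : 0 < c)
    (hcond : d.getD i 0 ≤ 0 ∨ h < c) : efPhase (h, d) (((i : Nat) : Int), c) = (h, d) := by
  unfold efPhase
  simp only [PySem.List.pyGetD_natCast, PySem.List.pySetD_natCast]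
  have hn : max 0 (min (d.getD i 0) (PySem.Int.floordiv h c)) = 0 := by
    rcases hcond with hd | hh
    · omega
    · have := floordiv_nonpos h c hc hh; omega
  rw [hn]
  simp
  rw [← List.getD_eq_getElem?_getD]
  exact set_getD_self d i hi

-- fixing one defect of a fixable category commutes with the phase
lemma efPhase_step (h c : Int) (d : List Int) (i : Nat) (hi : i < d.length) (hc : 0 < c)
    (hd : 0 < d.getD i 0) (hh : c ≤ h) :
    efPhase (h, d) (((i : Nat) : Int), c)
      = efPhase (h - c, d.set i (d.getD i 0 - 1)) (((i : Nat) : Int), c) := by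
  have hq : 1 ≤ PySem.Int.floordiv h c :=
    (PySem.Int.le_floordiv_iff_mul_le (a := h) (b := c) (q := 1) hc).2 (by omega)
  unfold efPhase
  simp only [PySem.List.pyGetD_natCast, PySem.List.pySetD_natCast]
  rw [getD_set_self d i _ hi, floordiv_sub_self h c hc, List.set_set]
  have hn' : max 0 (min (d.getD i 0 - 1) (PySem.Int.floordiv h c - 1))
      = max 0 (min (d.getD i 0) (PySem.Int.floordiv h c)) - 1 := by omega
  rw [hn']
  rw [Prod.mk.injEq]
  constructor
  · ring
  · congr 1; omega

-- the index-2 easy-major phase, specialised (the cast ↑(2:ℕ) becomes the numeral by simp)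
lemma noop2 (h : Int) (d : List Int) (hl : 4 ≤ d.length) (hc : d.getD 2 0 ≤ 0 ∨ h < 2) :
    efPhase (h, d) (2, 2) = (h, d) := by
  have := efPhase_noop h 2 d 2 (by omega) (by norm_num) hc
  simpa using this

lemma noop3 (h : Int) (d : List Int) (hl : 4 ≤ d.length) (hc : d.getD 3 0 ≤ 0 ∨ h < 2) :
    efPhase (h, d) (3, 2) = (h, d) := by
  have := efPhase_noop h 2 d 3 (by omega) (by norm_num) hc
  simpa using this

lemma noop0 (h : Int) (d : List Int) (hl : 4 ≤ d.length) (hc : d.getD 0 0 ≤ 0 ∨ h < 5) :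
    efPhase (h, d) (0, 5) = (h, d) := by
  have := efPhase_noop h 5 d 0 (by omega) (by norm_num) hc
  simpa using this

lemma noop1 (h : Int) (d : List Int) (hl : 4 ≤ d.length) (hc : d.getD 1 0 ≤ 0 ∨ h < 5) :
    efPhase (h, d) (1, 5) = (h, d) := by
  have := efPhase_noop h 5 d 1 (by omega) (by norm_num) hc
  simpa using this

lemma step2 (h : Int) (d : List Int) (hl : 4 ≤ d.length) (hd : 0 < d.getD 2 0) (hh : 2 ≤ h) :
    efPhase (h, d) (2, 2) = efPhase (h - 2, d.set 2 (d.getD 2 0 - 1)) (2, 2) := by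
  have := efPhase_step h 2 d 2 (by omega) (by norm_num) hd hh
  simpa using this

lemma step3 (h : Int) (d : List Int) (hl : 4 ≤ d.length) (hd : 0 < d.getD 3 0) (hh : 2 ≤ h) :
    efPhase (h, d) (3, 2) = efPhase (h - 2, d.set 3 (d.getD 3 0 - 1)) (3, 2) := by
  have := efPhase_step h 2 d 3 (by omega) (by norm_num) hd hh
  simpa using this

lemma step0 (h : Int) (d : List Int) (hl : 4 ≤ d.length) (hd : 0 < d.getD 0 0) (hh : 5 ≤ h) :
    efPhase (h, d) (0, 5) = efPhase (h - 5, d.set 0 (d.getD 0 0 - 1)) (0, 5) := by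
  have := efPhase_step h 5 d 0 (by omega) (by norm_num) hd hh
  simpa using this

lemma step1 (h : Int) (d : List Int) (hl : 4 ≤ d.length) (hd : 0 < d.getD 1 0) (hh : 5 ≤ h) :
    efPhase (h, d) (1, 5) = efPhase (h - 5, d.set 1 (d.getD 1 0 - 1)) (1, 5) := by
  have := efPhase_step h 5 d 1 (by omega) (by norm_num) hd hh
  simpa using this

-- B's fold written out
def efFold (h : Int) (d : List Int) : Int × List Int :=
  efPhase (efPhase (efPhase (efPhase (h, d) (2, 2)) (3, 2)) (0, 5)) (1, 5)

lemma efFold_eq (h : Int) (d : List Int) :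
    (([(2, 2), (3, 2), (0, 5), (1, 5)] : List (Int × Int)).foldl efPhase (h, d)) = efFold h d := by
  simp [List.foldl, efFold]

-- core invariant: A's greedy loop computes exactly B's four arithmetic phases
lemma loop_eq_fold (h : Int) (d : List Int) (hlen : 4 ≤ d.length) :
    easy_first h d = (efFold h d).2 := by
  induction hn : h.toNat using Nat.strong_induction_on generalizing h d with
  | _ n ih =>
  subst hn
  rw [easy_first]
  simp only [PySem.List.pyGetD_ofNat', pySetD0, pySetD1, pySetD2, pySetD3]
  by_cases hpos : h > 0
  · simp only [hpos, dif_pos]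
    by_cases b2 : d.getD 2 0 > 0 ∧ h ≥ 2
    · rw [if_pos b2,
        ih (h - 2).toNat (by omega) (h - 2) (d.set 2 (d.getD 2 0 - 1)) (by simpa using hlen) rfl]
      unfold efFold
      rw [← step2 h d hlen b2.1 b2.2]
    · rw [if_neg b2]
      have c2 : d.getD 2 0 ≤ 0 ∨ h < 2 := by
        by_contra hcon; rw [not_or, not_le, not_lt] at hcon; exact b2 ⟨hcon.1, hcon.2⟩
      by_cases b3 : d.getD 3 0 > 0 ∧ h ≥ 2
      · rw [if_pos b3,
          ih (h - 2).toNat (by omega) (h - 2) (d.set 3 (d.getD 3 0 - 1)) (by simpa using hlen) rfl]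
        unfold efFold
        have hl' : 4 ≤ (d.set 3 (d.getD 3 0 - 1)).length := by simpa using hlen
        have c2' : (d.set 3 (d.getD 3 0 - 1)).getD 2 0 ≤ 0 ∨ h - 2 < 2 := by
          rcases c2 with hx | hx
          · exact Or.inl (by rw [getD_set_ne d 2 3 _ (by omega)]; omega)
          · omega
        rw [noop2 h d hlen c2, noop2 (h - 2) _ hl' c2', ← step3 h d hlen b3.1 b3.2]
      · rw [if_neg b3]
        have c3 : d.getD 3 0 ≤ 0 ∨ h < 2 := by
          by_contra hcon; rw [not_or, not_le, not_lt] at hcon; exact b3 ⟨hcon.1, hcon.2⟩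
        by_cases b0 : d.getD 0 0 > 0 ∧ h ≥ 5
        · rw [if_pos b0,
            ih (h - 5).toNat (by omega) (h - 5) (d.set 0 (d.getD 0 0 - 1)) (by simpa using hlen) rfl]
          unfold efFold
          have hl' : 4 ≤ (d.set 0 (d.getD 0 0 - 1)).length := by simpa using hlen
          have c2' : (d.set 0 (d.getD 0 0 - 1)).getD 2 0 ≤ 0 ∨ h - 5 < 2 := by
            rcases c2 with hx | hx
            · exact Or.inl (by rw [getD_set_ne d 2 0 _ (by omega)]; omega)
            · omega
          have c3' : (d.set 0 (d.getD 0 0 - 1)).getD 3 0 ≤ 0 ∨ h - 5 < 2 := by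
            rcases c3 with hx | hx
            · exact Or.inl (by rw [getD_set_ne d 3 0 _ (by omega)]; omega)
            · omega
          rw [noop2 h d hlen c2, noop2 (h - 5) _ hl' c2', noop3 h d hlen c3,
            noop3 (h - 5) _ hl' c3', ← step0 h d hlen b0.1 b0.2]
        · rw [if_neg b0]
          have c0 : d.getD 0 0 ≤ 0 ∨ h < 5 := by
            by_contra hcon; rw [not_or, not_le, not_lt] at hcon; exact b0 ⟨hcon.1, hcon.2⟩
          by_cases b1 : d.getD 1 0 > 0 ∧ h ≥ 5
          · rw [if_pos b1,
              ih (h - 5).toNat (by omega) (h - 5) (d.set 1 (d.getD 1 0 - 1)) (by simpa using hlen) rfl]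
            unfold efFold
            have hl' : 4 ≤ (d.set 1 (d.getD 1 0 - 1)).length := by simpa using hlen
            have c2' : (d.set 1 (d.getD 1 0 - 1)).getD 2 0 ≤ 0 ∨ h - 5 < 2 := by
              rcases c2 with hx | hx
              · exact Or.inl (by rw [getD_set_ne d 2 1 _ (by omega)]; omega)
              · omega
            have c3' : (d.set 1 (d.getD 1 0 - 1)).getD 3 0 ≤ 0 ∨ h - 5 < 2 := by
              rcases c3 with hx | hx
              · exact Or.inl (by rw [getD_set_ne d 3 1 _ (by omega)]; omega)
              · omega
            have c0' : (d.set 1 (d.getD 1 0 - 1)).getD 0 0 ≤ 0 ∨ h - 5 < 5 := by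
              rcases c0 with hx | hx
              · exact Or.inl (by rw [getD_set_ne d 0 1 _ (by omega)]; omega)
              · omega
            rw [noop2 h d hlen c2, noop2 (h - 5) _ hl' c2', noop3 h d hlen c3,
              noop3 (h - 5) _ hl' c3', noop0 h d hlen c0, noop0 (h - 5) _ hl' c0',
              ← step1 h d hlen b1.1 b1.2]
          · rw [if_neg b1]
            have c1 : d.getD 1 0 ≤ 0 ∨ h < 5 := by
              by_contra hcon; rw [not_or, not_le, not_lt] at hcon; exact b1 ⟨hcon.1, hcon.2⟩
            unfold efFold
            rw [noop2 h d hlen c2, noop3 h d hlen c3, noop0 h d hlen c0, noop1 h d hlen c1]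
  · simp only [hpos, dif_neg, not_false_iff]
    unfold efFold
    rw [noop2 h d hlen (Or.inr (by omega)), noop3 h d hlen (Or.inr (by omega)),
      noop0 h d hlen (Or.inr (by omega)), noop1 h d hlen (Or.inr (by omega))]

-- ===== VERDICT (by name: the statement is the Claim_ definition above) =====
theorem easy_first_spec : Claim_equal_easy_first := by
  intro h d _ hpre
  unfold Spec_easy_first easy_first_alt
  by_cases hle : h ≤ 0
  · rw [if_pos hle, easy_first]
    simp [show ¬ h > 0 by omega]
  · rw [if_neg hle, efFold_eq]
    exact loop_eq_fold h d (hpre.resolve_left hle)
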